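-- pv_equiv track=rewrite | github.com/rcarradas/BEES-CHALLENGE | dags/plugins/operators/s3_gold_operator.py | _extract_partition_values
-- ===== SOURCE A (Python) =====
-- def _extract_partition_values(key: str):
--     """Parse ``country`` and ``state_province`` from an S3 partition key.
--
--     Expects Hive-style path segments in the key, e.g.::
--
--         openbreweries/breweries/country=united_states/state_province=california/2024-01-01.parquet
--
--     Args:
--         key (str): Full S3 object key.
--
--     Returns:
--         tuple[str, str]: ``(country, state_province)`` values.
--
--     Raises:
--         ValueError: If the key does not contain the expected
--             Hive partition segments.
--     """
--     parts = key.split("/")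
--     try:
--         country = next(p.split("=")[1] for p in parts if p.startswith("country="))
--         state   = next(p.split("=")[1] for p in parts if p.startswith("state_province="))
--     except StopIteration:
--         raise ValueError(
--             f"Could not extract partition values from key: {key}"
--         )
--     return country, state
-- ===== SOURCE B (Python) =====
-- def _extract_partition_values(key: str):
--     """Single fused pass with two first-wins accumulators and early exit,
--     instead of two independent generator scans."""
--     country = None
--     state = None
--     for p in key.split("/"):
--         if country is None and p.startswith("country="):
--             country = p.split("=")[1]
--         if state is None and p.startswith("state_province="):
--             state = p.split("=")[1]
--         if country is not None and state is not None:
--             return country, state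
--     raise ValueError(
--         f"Could not extract partition values from key: {key}"
--     )
-- ===== Notes on version B (the rewrite author's own statement) =====
-- stated objective: alternative
-- what changed: Replaces A's two independent next()-generator scans over the split key by one fused pass carrying two first-wins accumulators with an early exit once both are found.
import Mathlib
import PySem

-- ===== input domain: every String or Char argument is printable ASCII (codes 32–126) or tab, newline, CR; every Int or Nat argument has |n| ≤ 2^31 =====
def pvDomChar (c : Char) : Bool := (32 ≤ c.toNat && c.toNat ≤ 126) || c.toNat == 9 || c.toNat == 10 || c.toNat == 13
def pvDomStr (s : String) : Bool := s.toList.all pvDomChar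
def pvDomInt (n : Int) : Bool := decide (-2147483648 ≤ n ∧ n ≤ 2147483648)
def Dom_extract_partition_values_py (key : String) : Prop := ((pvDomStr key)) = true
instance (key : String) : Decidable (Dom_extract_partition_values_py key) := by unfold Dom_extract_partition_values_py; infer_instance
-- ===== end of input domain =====

-- B fuses A's two generator scans into one pass with two first-wins accumulators and an early exit (objective: alternative).

-- ===== PORT A =====
-- next(p.split("=")[1] for p in parts if p.startswith(pre)): first matching segment's value
def pvNextPart (pre : String) : List String → Option String
  | [] => none
  | p :: rest =>
    if PySem.Str.startswith p pre then
      some (PySem.List.pyGetD (((PySem.Str.split? p "=").getD [])) 1 "")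
    else pvNextPart pre rest

def extract_partition_values_py (key : String) : String × String :=
  let parts := ((PySem.Str.split? key "/").getD [])
  match pvNextPart "country=" parts, pvNextPart "state_province=" parts with
  | some c, some s => (c, s)
  | _, _ => ("", "")   -- StopIteration → ValueError in Python; excluded by Pre_

-- ===== PORT B =====
-- the fused loop: accumulators c, s; early return once both are set
def pvScanParts : List String → Option String → Option String → Option String × Option String
  | [], c, s => (c, s)
  | p :: rest, c, s =>
    let c' := if c.isNone && PySem.Str.startswith p "country=" then
        some (PySem.List.pyGetD (((PySem.Str.split? p "=").getD [])) 1 "") else c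
    let s' := if s.isNone && PySem.Str.startswith p "state_province=" then
        some (PySem.List.pyGetD (((PySem.Str.split? p "=").getD [])) 1 "") else s
    if c'.isSome && s'.isSome then (c', s') else pvScanParts rest c' s'

def extract_partition_values_py_alt (key : String) : String × String :=
  let r := pvScanParts ((PySem.Str.split? key "/").getD []) none none
  if r.1.isSome && r.2.isSome then (r.1.getD "", r.2.getD "")
  else ("", "")   -- loop falls through → ValueError in Python; excluded by Pre_

-- ===== PRECONDITION & SPEC =====
-- Pre_ excludes exactly the keys on which the Python A (and B) raises ValueError:
-- keys lacking a country or a state_province Hive partition segment.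
def Pre_extract_partition_values_py (key : String) : Prop :=
  ((((PySem.Str.split? key "/").getD [])).any (fun p => PySem.Str.startswith p "country=")
    && (((PySem.Str.split? key "/").getD [])).any (fun p => PySem.Str.startswith p "state_province=")) = true
instance (key : String) : Decidable (Pre_extract_partition_values_py key) := by
  unfold Pre_extract_partition_values_py; infer_instance

def pvWitness_extract_partition_values_py : String :=
  "data/country=us/state_province=ca/f.parquet"

def Spec_extract_partition_values_py (key : String) (out : String × String) : Prop := out = extract_partition_values_py_alt key
instance (key : String) (out : String × String) : Decidable (Spec_extract_partition_values_py key out) := by unfold Spec_extract_partition_values_py; infer_instance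

-- ===== CLAIM (what is proved, stated in full; the proofs are below) =====
def Claim_equal_extract_partition_values_py : Prop := ∀ (key : String), Dom_extract_partition_values_py key → Pre_extract_partition_values_py key → Spec_extract_partition_values_py key (extract_partition_values_py key)

-- ===== LEMMAS AND PROOFS =====

-- the fused scan computes exactly the pair of first matches (first-wins accumulators)
theorem pvScanParts_eq (parts : List String) :
    ∀ c s, pvScanParts parts c s
      = (c.or (pvNextPart "country=" parts), s.or (pvNextPart "state_province=" parts)) := by
  induction parts with
  | nil => intro c s; simp [pvScanParts, pvNextPart]
  | cons p rest ih =>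
    intro c s
    simp only [pvScanParts, pvNextPart]
    cases c <;> cases s <;>
      cases hc : PySem.Str.startswith p "country=" <;>
      cases hs : PySem.Str.startswith p "state_province=" <;>
      simp [ih, Option.or]

-- under Pre_, each scan finds its segment
theorem pvNextPart_ne_none (pre : String) (parts : List String)
    (h : parts.any (fun p => PySem.Str.startswith p pre) = true) :
    pvNextPart pre parts ≠ none := by
  induction parts with
  | nil => simp at h
  | cons p rest ih =>
    simp only [List.any_cons, Bool.or_eq_true, PySem.Str.startswith_eq] at h
    by_cases hp : PySem.Chars.startswith p.toList pre.toList = true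
    · simp [pvNextPart, hp]
    · simp [pvNextPart, hp]
      exact ih (by simpa using h.resolve_left hp)

-- ===== VERDICT (by name: the statement is the Claim_ definition above) =====
theorem extract_partition_values_py_spec : Claim_equal_extract_partition_values_py := by
  intro key _ hpre
  unfold Pre_extract_partition_values_py at hpre
  obtain ⟨hc, hs⟩ := Bool.and_eq_true_iff.mp hpre
  unfold Spec_extract_partition_values_py
  unfold extract_partition_values_py extract_partition_values_py_alt
  rw [pvScanParts_eq]
  cases h1 : pvNextPart "country=" ((PySem.Str.split? key "/").getD []) with
  | none => exact absurd h1 (pvNextPart_ne_none _ _ hc)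
  | some c =>
    cases h2 : pvNextPart "state_province=" ((PySem.Str.split? key "/").getD []) with
    | none => exact absurd h2 (pvNextPart_ne_none _ _ hs)
    | some s => simp [h1, h2, Option.or]
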